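-- pv_equiv track=rewrite | github.com/abinm2/python_practice | appointments_max.py | countMeetings
-- ===== SOURCE A (Python) =====
-- def countMeetings(firstDay, lastDay):
--     # Write your code here
--     appoint=dict()
--     max_ret=0
--     for i in range(len(firstDay)):
--         start=firstDay[i]
--         end=lastDay[i]
--         while start<=end:
--             if start not in appoint.keys():
--                 appoint[start]=1
--                 max_ret+=1
--                 break
--             start+=1
--     return max_ret
-- ===== SOURCE B (Python) =====
-- def countMeetings(firstDay, lastDay):
--     # Union-find "next free day" pointers with path compression:
--     # find(x) returns the smallest unoccupied day >= x by following compressed pointers.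
--     parent = {}
--
--     def find(x):
--         path = []
--         while x in parent:
--             path.append(x)
--             x = parent[x]
--         for v in path:
--             parent[v] = x
--         return x
--
--     count = 0
--     for start, end in zip(firstDay, lastDay):
--         day = find(start)
--         if day <= end:
--             parent[day] = day + 1
--             count += 1
--     return count
-- ===== Notes on version B (the rewrite author's own statement) =====
-- stated objective: alternative
-- what changed: A scans day by day from each meeting's start over the occupied-day dict; B instead keeps union-find 'next free day' pointers with path compression and jumps each meeting directly to its smallest free day.
import Mathlib
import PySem

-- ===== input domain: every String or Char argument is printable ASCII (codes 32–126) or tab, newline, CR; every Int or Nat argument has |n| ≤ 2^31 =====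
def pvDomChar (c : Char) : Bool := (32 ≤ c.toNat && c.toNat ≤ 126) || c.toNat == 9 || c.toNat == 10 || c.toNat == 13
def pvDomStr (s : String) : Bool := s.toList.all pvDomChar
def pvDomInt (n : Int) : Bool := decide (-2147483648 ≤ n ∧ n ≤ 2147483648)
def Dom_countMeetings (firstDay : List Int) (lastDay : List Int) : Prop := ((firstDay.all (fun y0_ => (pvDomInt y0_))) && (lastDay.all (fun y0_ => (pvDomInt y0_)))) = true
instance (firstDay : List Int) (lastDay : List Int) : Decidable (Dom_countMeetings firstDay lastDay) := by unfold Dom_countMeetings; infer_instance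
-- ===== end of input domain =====

-- B replaces A's day-by-day scan for the next free day (per meeting, over the occupied-day
-- dict) by union-find "next free day" pointers with path compression (an alternative algorithm).

-- ===== PORT A =====
-- the inner 'while start <= end' loop: scan upward for a free day, occupy it and count it
def aWhile (ap : PySem.Dict Int Int) (m : Int) (s e : Int) : PySem.Dict Int Int × Int :=
  if _h : s ≤ e then
    if (ap.get? s).isSome then aWhile ap m (s + 1) e
    else (ap.insert s 1, m + 1)
  else (ap, m)
termination_by (e + 1 - s).toNat
decreasing_by omega

-- 'for i in range(len(firstDay))'; lastDay[i] is exact under Pre_ (i < len(lastDay))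
def aLoop (firstDay lastDay : List Int) (i : Nat) (ap : PySem.Dict Int Int) (m : Int) : Int :=
  if h : i < firstDay.length then
    let st := aWhile ap m firstDay[i] (PySem.List.pyGetD lastDay (i : Int) 0)
    aLoop firstDay lastDay (i + 1) st.1 st.2
  else m
termination_by firstDay.length - i

def countMeetings (firstDay : List Int) (lastDay : List Int) : Int :=
  aLoop firstDay lastDay 0 PySem.Dict.empty 0

-- ===== PORT B =====
-- 'find': follow 'parent' pointers to the first day not in the dict, recording the path.
-- Fuel (dict size + 1) is a totality guard only: the pointer chain visits distinct keys.
def bFind (parent : PySem.Dict Int Int) (x : Int) : Nat → Int × List Int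
  | 0 => (x, [])
  | fuel + 1 =>
    match parent.get? x with
    | none => (x, [])
    | some y =>
      let rp := bFind parent y fuel
      (rp.1, x :: rp.2)

-- one meeting: find the next free day (with path compression), occupy it if within range
def bStep (st : PySem.Dict Int Int × Int) (me : Int × Int) : PySem.Dict Int Int × Int :=
  let rp := bFind st.1 me.1 (st.1.size + 1)
  let parent := rp.2.foldl (fun d v => d.insert v rp.1) st.1
  if rp.1 ≤ me.2 then (parent.insert rp.1 (rp.1 + 1), st.2 + 1)
  else (parent, st.2)

def countMeetings_alt (firstDay : List Int) (lastDay : List Int) : Int :=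
  ((firstDay.zip lastDay).foldl bStep (PySem.Dict.empty, 0)).2

-- ===== PRECONDITION & SPEC =====
-- Pre_ excludes exactly the inputs where A raises IndexError (lastDay shorter than firstDay).
def Pre_countMeetings (firstDay : List Int) (lastDay : List Int) : Prop :=
  firstDay.length ≤ lastDay.length
instance (firstDay : List Int) (lastDay : List Int) : Decidable (Pre_countMeetings firstDay lastDay) := by unfold Pre_countMeetings; infer_instance

def pvWitness_countMeetings : List Int × List Int := ([1, 1, 2], [2, 2, 2])

def Spec_countMeetings (firstDay : List Int) (lastDay : List Int) (out : Int) : Prop := out = countMeetings_alt firstDay lastDay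
instance (firstDay : List Int) (lastDay : List Int) (out : Int) : Decidable (Spec_countMeetings firstDay lastDay out) := by unfold Spec_countMeetings; infer_instance

-- ===== CLAIM (what is proved, stated in full; the proofs are below) =====
def Claim_equal_countMeetings : Prop := ∀ (firstDay : List Int) (lastDay : List Int), Dom_countMeetings firstDay lastDay → Pre_countMeetings firstDay lastDay → Spec_countMeetings firstDay lastDay (countMeetings firstDay lastDay)

-- ===== LEMMAS AND PROOFS =====

-- occupied-day dicts of A and B have the same key set
def KeysEq (ap p : PySem.Dict Int Int) : Prop :=
  ∀ k, (ap.get? k).isSome ↔ (p.get? k).isSome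

-- every pointer points strictly forward, jumping only over occupied days
def Inv2 (p : PySem.Dict Int Int) : Prop :=
  ∀ k y, p.get? k = some y → k < y ∧ ∀ z, k ≤ z → z < y → (p.get? z).isSome

-- r is the smallest free day ≥ s
def Reach (d : PySem.Dict Int Int) (s r : Int) : Prop :=
  s ≤ r ∧ d.get? r = none ∧ ∀ z, s ≤ z → z < r → (d.get? z).isSome

def aStep (st : PySem.Dict Int Int × Int) (me : Int × Int) : PySem.Dict Int Int × Int :=
  aWhile st.1 st.2 me.1 me.2

lemma countP_lt_of_mem {l : List Int} {x y : Int} (hx : x ∈ l) (hxy : x < y) :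
    l.countP (fun k => decide (y ≤ k)) < l.countP (fun k => decide (x ≤ k)) := by
  induction l with
  | nil => cases hx
  | cons a t ih =>
    have hmono : t.countP (fun k => decide (y ≤ k)) ≤ t.countP (fun k => decide (x ≤ k)) := by
      apply List.countP_mono_left
      intro b _ hb
      simp only [decide_eq_true_eq] at *
      omega
    rcases List.mem_cons.mp hx with h | h
    · subst h
      simp only [List.countP_cons]
      have h1 : (decide (y ≤ x)) = false := by simp; omega
      simp [h1]; omega
    · have := ih h
      simp only [List.countP_cons]
      by_cases hya : y ≤ a
      · have : x ≤ a := le_of_lt (lt_of_lt_of_le hxy hya)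
        simp [hya, this]; omega
      · simp [hya]; split <;> omega

lemma bFind_spec (p : PySem.Dict Int Int) (hI : Inv2 p) :
    ∀ (fuel : Nat) (x : Int),
      p.keys.countP (fun k => decide (x ≤ k)) < fuel →
      Reach p x (bFind p x fuel).1 ∧
        ∀ v ∈ (bFind p x fuel).2, x ≤ v ∧ v < (bFind p x fuel).1 := by
  intro fuel
  induction fuel with
  | zero => intro x h; omega
  | succ f ih =>
    intro x hcnt
    cases hpx : p.get? x with
    | none =>
      have hbf : bFind p x (f + 1) = (x, []) := by simp [bFind, hpx]
      rw [hbf]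
      exact ⟨⟨le_refl x, hpx, fun z h1 h2 => by omega⟩, by simp⟩
    | some y =>
      obtain ⟨hxy, hocc⟩ := hI x y hpx
      have hxkeys : x ∈ p.keys := by
        by_contra hc
        have := (PySem.Dict.get?_eq_none_iff_not_mem_keys (d := p) (k := x)).mpr hc
        simp [hpx] at this
      have hcnt' : p.keys.countP (fun k => decide (y ≤ k)) < f :=
        lt_of_lt_of_le (countP_lt_of_mem hxkeys hxy) (by omega)
      obtain ⟨⟨hyr, hr, hiv⟩, hpath⟩ := ih y hcnt'
      have hbf : bFind p x (f + 1) = ((bFind p y f).1, x :: (bFind p y f).2) := by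
        simp [bFind, hpx]
      rw [hbf]
      refine ⟨⟨by omega, hr, fun z h1 h2 => ?_⟩, ?_⟩
      · by_cases hz : z < y
        · exact hocc z h1 hz
        · exact hiv z (by omega) h2
      · intro v hv
        rcases List.mem_cons.mp hv with h | h
        · subst h; exact ⟨le_refl _, by omega⟩
        · obtain ⟨h1, h2⟩ := hpath v h
          exact ⟨by omega, h2⟩

lemma foldl_insert_get? (path : List Int) (r : Int) (p : PySem.Dict Int Int) (k : Int) :
    (path.foldl (fun d v => d.insert v r) p).get? k
      = if k ∈ path then some r else p.get? k := by
  induction path generalizing p with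
  | nil => simp
  | cons a t ih =>
    simp only [List.foldl_cons, ih, List.mem_cons]
    by_cases hk : k ∈ t
    · simp [hk]
    · by_cases hka : k = a
      · subst hka; simp [hk, PySem.Dict.get?_insert_self]
      · simp [hk, hka, PySem.Dict.get?_insert_of_ne _ _ hka]

lemma aWhile_eq (ap : PySem.Dict Int Int) (m : Int) (r : Int) :
    ∀ s e, Reach ap s r →
      aWhile ap m s e = if r ≤ e then (ap.insert r 1, m + 1) else (ap, m) := by
  intro s e
  fun_induction aWhile ap m s e with
  | case1 s hse hocc ih =>
    intro hre
    obtain ⟨hsr, hrfree, hiv⟩ := hre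
    have hsr' : s < r := by
      rcases lt_or_eq_of_le hsr with h | h
      · exact h
      · subst h; rw [hrfree] at hocc; simp at hocc
    exact ih ⟨by omega, hrfree, fun z h1 h2 => hiv z (by omega) h2⟩
  | case2 s hse hocc =>
    intro hre
    obtain ⟨hsr, hrfree, hiv⟩ := hre
    have : r = s := by
      by_contra hc
      have : s < r := by omega
      have := hiv s (le_refl s) this
      simp at hocc
      simp [hocc] at this
    subst this
    simp [hse]
  | case3 s hse =>
    intro hre
    obtain ⟨hsr, _, _⟩ := hre
    have : ¬ r ≤ e := by omega
    simp [this]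

lemma step_eq (ap p : PySem.Dict Int Int) (m : Int) (me : Int × Int)
    (hK : KeysEq ap p) (hI : Inv2 p) :
    (aStep (ap, m) me).2 = (bStep (p, m) me).2 ∧
      KeysEq (aStep (ap, m) me).1 (bStep (p, m) me).1 ∧ Inv2 (bStep (p, m) me).1 := by
  obtain ⟨s, e⟩ := me
  have hklen : p.keys.length = p.size := by
    simp [PySem.Dict.keys, PySem.Dict.size]
  have hcnt : p.keys.countP (fun k => decide (s ≤ k)) < p.size + 1 := by
    have := List.countP_le_length (p := fun k => decide (s ≤ k)) (l := p.keys)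
    omega
  obtain ⟨hreach, hpath⟩ := bFind_spec p hI (p.size + 1) s hcnt
  set r := (bFind p s (p.size + 1)).1 with hrdef
  set path := (bFind p s (p.size + 1)).2 with hpdef
  obtain ⟨hsr, hrfree, hiv⟩ := hreach
  have hreach_ap : Reach ap s r := by
    refine ⟨hsr, ?_, fun z h1 h2 => (hK z).mpr (hiv z h1 h2)⟩
    have : ¬ (ap.get? r).isSome := by
      rw [hK r, hrfree]; simp
    exact Option.not_isSome_iff_eq_none.mp this
  have hA : aStep (ap, m) (s, e) = if r ≤ e then (ap.insert r 1, m + 1) else (ap, m) :=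
    aWhile_eq ap m r s e hreach_ap
  set p2 := path.foldl (fun d v => d.insert v r) p with hp2def
  have hg2 : ∀ k, p2.get? k = if k ∈ path then some r else p.get? k :=
    fun k => foldl_insert_get? path r p k
  have hocc2 : ∀ k, (p2.get? k).isSome ↔ (p.get? k).isSome := by
    intro k
    rw [hg2 k]
    by_cases hk : k ∈ path
    · obtain ⟨h1, h2⟩ := hpath k hk
      simp [hk, hiv k h1 h2]
    · simp [hk]
  have hr2 : p2.get? r = none := by
    rw [hg2 r]
    have : r ∉ path := fun hc => absurd (hpath r hc).2 (lt_irrefl r)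
    simp [this, hrfree]
  have hI2 : Inv2 p2 := by
    intro k y h
    rw [hg2 k] at h
    by_cases hk : k ∈ path
    · simp only [hk, if_true, Option.some.injEq] at h
      obtain ⟨h1, h2⟩ := hpath k hk
      subst h
      exact ⟨h2, fun z hz1 hz2 => (hocc2 z).mpr (hiv z (by omega) hz2)⟩
    · simp only [hk, if_false] at h
      obtain ⟨h1, h2⟩ := hI k y h
      exact ⟨h1, fun z hz1 hz2 => (hocc2 z).mpr (h2 z hz1 hz2)⟩
  have hB : bStep (p, m) (s, e)
      = if r ≤ e then (p2.insert r (r + 1), m + 1) else (p2, m) := by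
    simp only [bStep, ← hrdef, ← hpdef, ← hp2def]
  rw [hA, hB]
  by_cases hre : r ≤ e
  · simp only [hre, if_true]
    refine ⟨by trivial, ?_, ?_⟩
    · intro k
      rw [PySem.Dict.get?_insert, PySem.Dict.get?_insert]
      by_cases hk : k = r
      · simp [hk]
      · simp only [hk, if_false]
        rw [hK k, hocc2 k]
    · intro k y h
      rw [PySem.Dict.get?_insert] at h
      by_cases hk : k = r
      · simp only [hk, if_true, Option.some.injEq] at h
        refine ⟨by omega, fun z hz1 hz2 => ?_⟩
        have hz : z = r := by omega
        rw [hz, PySem.Dict.get?_insert_self]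
        simp
      · simp only [hk, if_false] at h
        obtain ⟨h1, h2⟩ := hI2 k y h
        refine ⟨h1, fun z hz1 hz2 => ?_⟩
        rw [PySem.Dict.get?_insert]
        by_cases hz : z = r
        · simp [hz]
        · simp only [hz, if_false]
          exact h2 z hz1 hz2
  · simp only [hre, if_false]
    exact ⟨by trivial, fun k => (hK k).trans (hocc2 k).symm, hI2⟩

lemma fold_eq : ∀ (L : List (Int × Int)) (ap p : PySem.Dict Int Int) (m : Int),
    KeysEq ap p → Inv2 p →
    (L.foldl aStep (ap, m)).2 = (L.foldl bStep (p, m)).2 := by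
  intro L
  induction L with
  | nil => intro ap p m _ _; rfl
  | cons me t ih =>
    intro ap p m hK hI
    obtain ⟨hm, hK', hI'⟩ := step_eq ap p m me hK hI
    simp only [List.foldl_cons]
    have hA : aStep (ap, m) me = ((aStep (ap, m) me).1, (aStep (ap, m) me).2) := rfl
    have hB : bStep (p, m) me = ((bStep (p, m) me).1, (bStep (p, m) me).2) := rfl
    rw [hA, hB, hm]
    exact ih _ _ _ hK' hI' 

lemma aLoop_eq (fd ld : List Int) (hlen : fd.length ≤ ld.length) :
    ∀ (i : Nat) (ap : PySem.Dict Int Int) (m : Int),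
      aLoop fd ld i ap m = (((fd.zip ld).drop i).foldl aStep (ap, m)).2 := by
  intro i ap m
  have hzlen : (fd.zip ld).length = fd.length := by
    rw [List.length_zip]; omega
  fun_induction aLoop fd ld i ap m with
  | case1 i ap m h st ih =>
    have hiz : i < (fd.zip ld).length := by omega
    have he : PySem.List.pyGetD ld (i : Int) 0 = ld[i] := by
      rw [PySem.List.pyGetD_natCast]
      exact List.getD_eq_getElem ld 0 (by omega)
    rw [List.drop_eq_getElem_cons hiz, List.foldl_cons, List.getElem_zip, ← he]
    have hst : aStep (ap, m) (fd[i], PySem.List.pyGetD ld (i : Int) 0) = (st.1, st.2) := rfl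
    rw [hst]
    exact ih
  | case2 i ap m h =>
    have hnil : (fd.zip ld).drop i = [] := by
      apply List.drop_eq_nil_of_le; omega
    rw [hnil]
    rfl

-- ===== VERDICT (by name: the statement is the Claim_ definition above) =====
theorem countMeetings_spec : Claim_equal_countMeetings := by
  intro fd ld _ hpre
  unfold Spec_countMeetings countMeetings countMeetings_alt
  rw [aLoop_eq fd ld hpre 0, List.drop_zero]
  exact fold_eq _ _ _ _ (fun k => Iff.rfl) (fun k y h => by simp [PySem.Dict.get?_empty] at h)
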